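-- pv_equiv track=rewrite | github.com/SreeshaKS/ds_algorithms | DS_Algo_Python/foobar/bringing-a-gun-to-a-guard-fight/sol2.py | generate_dist_vector
-- ===== SOURCE A (Python) =====
-- def generate_dist_vector(size, start, tot_length, length):
--     tmp = [start]
--     count = 0
--     l, r = -length, tot_length - length
--
--     for _ in range(size):
--         left = tmp[0]
--         right = tmp[count]
--         left += (l*2)
--         right += (r*2)
--         l, r = -r,-l
--         tmp = [left] + tmp + [right]
--         count += 2
--     return tmp
-- ===== SOURCE B (Python) =====
-- def generate_dist_vector(size, start, tot_length, length):
--     # Closed form: the k-th mirror image left/right of start, assembled in one pass.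
--     n = max(size, 0)
--     def left(k):
--         if k % 2 == 0:
--             return start - k * tot_length
--         return start - (k - 1) * tot_length - 2 * length
--     def right(k):
--         if k % 2 == 0:
--             return start + k * tot_length
--         return start + (k - 1) * tot_length + 2 * (tot_length - length)
--     return [left(k) for k in range(n, 0, -1)] + [start] + [right(k) for k in range(1, n + 1)]
-- ===== Notes on version B (the rewrite author's own statement) =====
-- stated objective: faster
-- what changed: A grows the vector by prepending/appending via full list concatenation each iteration (quadratic copying) while tracking running left/right offsets; B computes each position's value from a parity-based closed form and assembles the list in one pass.
import Mathlib
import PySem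

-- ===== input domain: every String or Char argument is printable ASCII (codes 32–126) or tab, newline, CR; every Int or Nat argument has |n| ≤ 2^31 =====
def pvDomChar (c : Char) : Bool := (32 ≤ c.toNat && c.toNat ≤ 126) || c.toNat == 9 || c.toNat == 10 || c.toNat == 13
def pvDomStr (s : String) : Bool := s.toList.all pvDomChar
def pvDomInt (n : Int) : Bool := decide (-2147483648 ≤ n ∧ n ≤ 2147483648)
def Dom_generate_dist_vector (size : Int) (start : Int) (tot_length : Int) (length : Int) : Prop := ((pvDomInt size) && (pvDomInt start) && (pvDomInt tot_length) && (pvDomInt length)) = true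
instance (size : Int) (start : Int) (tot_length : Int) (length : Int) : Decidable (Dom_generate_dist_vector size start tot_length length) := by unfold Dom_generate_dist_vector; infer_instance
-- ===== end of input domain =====

-- B replaces A's quadratic repeated-list-concatenation loop by a closed form per position, assembled in one pass.


-- ===== PORT A =====
-- loop body of A; tmp[0] and tmp[count] are always in range (tmp nonempty, count = len(tmp)-1),
-- so `.getD 0` is never taken on `none`
def gdvStep (s : List Int × Int × Int × Int) (_x : Int) : List Int × Int × Int × Int :=
  let tmp := s.1
  let count := s.2.1
  let l := s.2.2.1
  let r := s.2.2.2
  let left := (PySem.List.pyGet? tmp 0).getD 0 + l * 2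
  let right := (PySem.List.pyGet? tmp count).getD 0 + r * 2
  ([left] ++ tmp ++ [right], count + 2, -r, -l)

def generate_dist_vector (size : Int) (start : Int) (tot_length : Int) (length : Int) : List Int :=
  ((PySem.List.pyRange 0 size 1).foldl gdvStep ([start], 0, -length, tot_length - length)).1

-- ===== PORT B =====
def gdvLeft (start tot_length length k : Int) : Int :=
  if k % 2 = 0 then start - k * tot_length else start - (k - 1) * tot_length - 2 * length

def gdvRight (start tot_length length k : Int) : Int :=
  if k % 2 = 0 then start + k * tot_length else start + (k - 1) * tot_length + 2 * (tot_length - length)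

def generate_dist_vector_alt (size : Int) (start : Int) (tot_length : Int) (length : Int) : List Int :=
  let n := max size 0
  (PySem.List.pyRange n 0 (-1)).map (gdvLeft start tot_length length)
    ++ [start]
    ++ (PySem.List.pyRange 1 (n + 1) 1).map (gdvRight start tot_length length)

-- ===== PRECONDITION & SPEC =====
def Spec_generate_dist_vector (size : Int) (start : Int) (tot_length : Int) (length : Int) (out : List Int) : Prop := out = generate_dist_vector_alt size start tot_length length
instance (size : Int) (start : Int) (tot_length : Int) (length : Int) (out : List Int) : Decidable (Spec_generate_dist_vector size start tot_length length out) := by unfold Spec_generate_dist_vector; infer_instance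

-- ===== CLAIM (what is proved, stated in full; the proofs are below) =====
def Claim_equal_generate_dist_vector : Prop := ∀ (size : Int) (start : Int) (tot_length : Int) (length : Int), Dom_generate_dist_vector size start tot_length length → Spec_generate_dist_vector size start tot_length length (generate_dist_vector size start tot_length length)

-- ===== LEMMAS AND PROOFS =====

-- tmp after n iterations of A's loop
def gdvTmp (start T len : Int) (n : Nat) : List Int :=
  ((List.range n).reverse.map (fun j => gdvLeft start T len (j + 1)))
    ++ start :: (List.range n).map (fun j => gdvRight start T len (j + 1))

-- full state after n iterations
def gdvSt (start T len : Int) (n : Nat) : List Int × Int × Int × Int :=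
  (gdvTmp start T len n, 2 * n,
   if n % 2 = 0 then -len else -(T - len),
   if n % 2 = 0 then T - len else len)

lemma foldl_gdvStep (xs : List Int) (s : List Int × Int × Int × Int) :
    xs.foldl gdvStep s = (fun s => gdvStep s 0)^[xs.length] s := by
  induction xs generalizing s with
  | nil => rfl
  | cons x xs ih =>
    simp only [List.foldl_cons, List.length_cons, Function.iterate_succ_apply, ih]
    rfl

lemma gdvTmp_length (start T len : Int) (n : Nat) :
    (gdvTmp start T len n).length = 2 * n + 1 := by
  simp [gdvTmp]; omega

lemma gdvTmp_head (start T len : Int) (n : Nat) :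
    (gdvTmp start T len n)[0]? = some (gdvLeft start T len n) := by
  cases n with
  | zero => simp [gdvTmp, gdvLeft]
  | succ m =>
    simp [gdvTmp, List.range_succ]

lemma gdvTmp_succ (start T len : Int) (n : Nat) :
    gdvTmp start T len (n + 1) =
      [gdvLeft start T len ((n : Int) + 1)] ++ gdvTmp start T len n
        ++ [gdvRight start T len ((n : Int) + 1)] := by
  simp [gdvTmp, List.range_succ]

lemma gdvTmp_last (start T len : Int) (n : Nat) :
    (gdvTmp start T len n)[2 * n]? = some (gdvRight start T len n) := by
  cases n with
  | zero => simp [gdvTmp, gdvRight]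
  | succ m =>
    have hlen : (gdvTmp start T len (m + 1)).length = 2 * (m + 1) + 1 :=
      gdvTmp_length start T len (m + 1)
    rw [List.getElem?_eq_getElem (by omega)]
    have : (gdvTmp start T len (m + 1)).getLast? =
        some (gdvRight start T len (m + 1)) := by
      rw [show gdvTmp start T len (m + 1)
          = (gdvLeft start T len ((m : Int) + 1) :: (gdvTmp start T len m))
              ++ [gdvRight start T len ((m : Int) + 1)] from by
            rw [gdvTmp_succ]; simp]
      rw [List.getLast?_concat]
    rw [List.getLast?_eq_getElem?] at this
    rw [← List.getElem?_eq_getElem (by omega)]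
    have h2 : (gdvTmp start T len (m + 1)).length - 1 = 2 * (m + 1) := by omega
    rwa [h2] at this

lemma gdvLeft_step (start T len : Int) (n : Nat) :
    gdvLeft start T len ((n : Int) + 1) =
      gdvLeft start T len n + (if n % 2 = 0 then -len else -(T - len)) * 2 := by
  by_cases h : n % 2 = 0
  · rw [if_pos h]
    have h1 : ((n : Int) + 1) % 2 = 1 := by omega
    have h2 : (n : Int) % 2 = 0 := by omega
    simp only [gdvLeft, h1, h2]
    norm_num; ring
  · rw [if_neg h]
    have h1 : ((n : Int) + 1) % 2 = 0 := by omega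
    have h2 : (n : Int) % 2 = 1 := by omega
    simp only [gdvLeft, h1, h2]
    norm_num; ring

lemma gdvRight_step (start T len : Int) (n : Nat) :
    gdvRight start T len ((n : Int) + 1) =
      gdvRight start T len n + (if n % 2 = 0 then T - len else len) * 2 := by
  by_cases h : n % 2 = 0
  · rw [if_pos h]
    have h1 : ((n : Int) + 1) % 2 = 1 := by omega
    have h2 : (n : Int) % 2 = 0 := by omega
    simp only [gdvRight, h1, h2]
    norm_num; ring
  · rw [if_neg h]
    have h1 : ((n : Int) + 1) % 2 = 0 := by omega
    have h2 : (n : Int) % 2 = 1 := by omega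
    simp only [gdvRight, h1, h2]
    norm_num; ring

lemma gdvIter (start T len : Int) (n : Nat) :
    (fun s => gdvStep s 0)^[n] ([start], 0, -len, T - len) = gdvSt start T len n := by
  induction n with
  | zero => simp [gdvSt, gdvTmp]
  | succ m ih =>
    rw [Function.iterate_succ_apply', ih]
    have hhead := gdvTmp_head start T len m
    have hlast := gdvTmp_last start T len m
    have hlen := gdvTmp_length start T len m
    simp only [gdvStep, gdvSt]
    refine Prod.ext ?_ (Prod.ext ?_ (Prod.ext ?_ ?_)) <;> simp only
    · rw [gdvTmp_succ]
      congr 2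
      · rw [show (PySem.List.pyGet? (gdvTmp start T len m) 0) =
            (gdvTmp start T len m)[(0:Nat)]? from by
              simpa using PySem.List.pyGet?_natCast (gdvTmp start T len m) 0]
        rw [hhead, gdvLeft_step]
        simp
      · rw [show (PySem.List.pyGet? (gdvTmp start T len m) (2 * (m : Int))) =
            (gdvTmp start T len m)[2 * m]? from by
              simpa using PySem.List.pyGet?_natCast (gdvTmp start T len m) (2 * m)]
        rw [hlast, gdvRight_step]
        simp
    · push_cast; ring
    · by_cases h : m % 2 = 0
      · rw [if_pos h, if_neg (by omega)]
      · rw [if_neg h, if_pos (by omega)]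
    · by_cases h : m % 2 = 0
      · rw [if_pos h, if_neg (by omega)]; ring
      · rw [if_neg h, if_pos (by omega)]; ring

lemma alt_eq_gdvTmp (start T len : Int) (n : Nat) :
    (PySem.List.pyRange (n : Int) 0 (-1)).map (gdvLeft start T len)
      ++ [start]
      ++ (PySem.List.pyRange 1 ((n : Int) + 1) 1).map (gdvRight start T len)
      = gdvTmp start T len n := by
  induction n with
  | zero => simp [gdvTmp, PySem.List.pyRange_one_eq_nil, PySem.List.pyRange_neg_one_eq_nil]
  | succ m ih =>
    rw [gdvTmp_succ, ← ih]
    have h1 : PySem.List.pyRange ((m : Int) + 1) 0 (-1) =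
        ((m : Int) + 1) :: PySem.List.pyRange ((m : Int) + 1 - 1) 0 (-1) :=
      PySem.List.pyRange_neg_one_cons (by omega)
    have h2 : PySem.List.pyRange 1 ((m : Int) + 1 + 1) 1 =
        PySem.List.pyRange 1 ((m : Int) + 1) 1 ++ [(m : Int) + 1] :=
      PySem.List.pyRange_one_succ_right (by omega)
    push_cast
    rw [h1, h2]
    simp

-- ===== VERDICT (by name: the statement is the Claim_ definition above) =====
theorem generate_dist_vector_spec : Claim_equal_generate_dist_vector := by
  intro size start T len _
  unfold Spec_generate_dist_vector generate_dist_vector generate_dist_vector_alt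
  rw [foldl_gdvStep, PySem.List.length_pyRange_one, gdvIter]
  have hmax : max size 0 = ((size.toNat : Int)) := by omega
  simp only [hmax, Int.sub_zero]
  rw [alt_eq_gdvTmp]
  rfl
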